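-- pv_equiv track=rewrite | github.com/ModelCloud/GPTQModel | gptqmodel/models/writer.py | _resolve_layer_split_group
-- ===== SOURCE A (Python) =====
-- from typing import Any, Dict, List, Optional, Union
--
-- def _resolve_layer_split_group(tensor_name: str, layer_prefixes: List[str]) -> tuple[str, bool]:
--     for prefix in sorted((prefix for prefix in layer_prefixes if prefix), key=len, reverse=True):
--         expected_prefix = f"{prefix}."
--         if not tensor_name.startswith(expected_prefix):
--             continue
--         remainder = tensor_name[len(expected_prefix):]
--         layer_idx, dot, _ = remainder.partition(".")
--         if layer_idx.isdigit() and dot: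
--             return f"{prefix}.{layer_idx}", True
--
--     if "." in tensor_name:
--         return tensor_name.rsplit(".", 1)[0], False
--     return "", False
-- ===== SOURCE B (Python) =====
-- from typing import List
--
--
-- def _resolve_layer_split_group(tensor_name: str, layer_prefixes: List[str]) -> tuple[str, bool]:
--     best_group = None
--     best_len = -1
--     for prefix in layer_prefixes:
--         if not prefix:
--             continue
--         expected_prefix = prefix + "."
--         if not tensor_name.startswith(expected_prefix):
--             continue
--         layer_idx, dot, _ = tensor_name[len(expected_prefix):].partition(".")
--         if layer_idx.isdigit() and dot and len(prefix) > best_len: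
--             best_group = f"{prefix}.{layer_idx}"
--             best_len = len(prefix)
--     if best_group is not None:
--         return best_group, True
--     if "." in tensor_name:
--         return tensor_name.rsplit(".", 1)[0], False
--     return "", False
-- ===== Notes on version B (the rewrite author's own statement) =====
-- stated objective: simpler
-- what changed: Replaced the sort-by-length-then-first-match loop with a single unsorted pass that keeps the matching group of strictly maximal prefix length (safe because two distinct equal-length prefixes cannot both be prefixes of the same tensor name); dropping the sort also makes it measurably faster.
import Mathlib
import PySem

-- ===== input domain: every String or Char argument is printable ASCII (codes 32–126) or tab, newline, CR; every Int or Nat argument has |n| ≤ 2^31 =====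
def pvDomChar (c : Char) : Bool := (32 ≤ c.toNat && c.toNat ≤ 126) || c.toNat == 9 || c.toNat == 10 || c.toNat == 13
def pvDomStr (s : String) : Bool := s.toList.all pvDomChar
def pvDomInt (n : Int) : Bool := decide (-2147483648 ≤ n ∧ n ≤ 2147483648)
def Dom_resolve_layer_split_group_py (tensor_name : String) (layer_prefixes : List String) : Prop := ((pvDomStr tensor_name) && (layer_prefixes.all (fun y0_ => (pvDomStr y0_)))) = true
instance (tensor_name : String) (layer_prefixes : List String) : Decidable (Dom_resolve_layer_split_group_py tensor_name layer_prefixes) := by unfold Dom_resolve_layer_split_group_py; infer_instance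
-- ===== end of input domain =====

-- B replaces A's sort-by-length-descending + first-match loop by one unsorted pass keeping the
-- match of strictly maximal prefix length (simpler; two distinct equal-length prefixes cannot
-- both be prefixes of the same tensor name, so dropping the sort is exact).

-- ===== PORT A =====
-- remainder.partition(".") ported by hand via find/take/drop (exact: first '.' or the whole string)
def pvPartDot (s : List Char) : List Char × List Char × List Char :=
  let i := PySem.Chars.find s ['.']
  if i = -1 then (s, [], []) else (s.take i.toNat, ['.'], s.drop (i.toNat + 1))

-- the for-loop with early return; [] = loop fell through → the two fallback returns
def pvAloop (t : List Char) : List (List Char) → String × Bool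
  | [] =>
      if PySem.Chars.isIn ['.'] t then
        -- tensor_name.rsplit(".", 1)[0] = everything before the last '.'
        (String.ofList (t.take (PySem.Chars.rfind t ['.']).toNat), false)
      else ("", false)
  | p :: rest =>
      let expected := p ++ ['.']
      if PySem.Chars.startswith t expected then
        let remainder := t.drop expected.length
        let pr := pvPartDot remainder
        if PySem.Chars.strIsdigit pr.1 && !pr.2.1.isEmpty then
          (String.ofList (p ++ '.' :: pr.1), true)
        else pvAloop t rest
      else pvAloop t rest

def resolve_layer_split_group_py (tensor_name : String) (layer_prefixes : List String) : String × Bool :=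
  pvAloop tensor_name.toList
    (PySem.List.sorted ((layer_prefixes.map String.toList).filter (fun p => !p.isEmpty))
      (fun p => p.length) true)

-- ===== PORT B =====
-- one loop step: state = (best_group, best_len)
def pvBstep (t : List Char) (st : Option (List Char) × Int) (p : List Char) :
    Option (List Char) × Int :=
  if p.isEmpty then st
  else
    let expected := p ++ ['.']
    if PySem.Chars.startswith t expected then
      let pr := pvPartDot (t.drop expected.length)
      if PySem.Chars.strIsdigit pr.1 && !pr.2.1.isEmpty && ((p.length : Int) > st.2) then
        (some (p ++ '.' :: pr.1), (p.length : Int))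
      else st
    else st

def resolve_layer_split_group_py_alt (tensor_name : String) (layer_prefixes : List String) :
    String × Bool :=
  let st := (layer_prefixes.map String.toList).foldl (pvBstep tensor_name.toList) (none, -1)
  match st.1 with
  | some g => (String.ofList g, true)
  | none =>
      if PySem.Chars.isIn ['.'] tensor_name.toList then
        (String.ofList (tensor_name.toList.take (PySem.Chars.rfind tensor_name.toList ['.']).toNat),
          false)
      else ("", false)

-- ===== PRECONDITION & SPEC =====
def Spec_resolve_layer_split_group_py (tensor_name : String) (layer_prefixes : List String) (out : String × Bool) : Prop := out = resolve_layer_split_group_py_alt tensor_name layer_prefixes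
instance (tensor_name : String) (layer_prefixes : List String) (out : String × Bool) : Decidable (Spec_resolve_layer_split_group_py tensor_name layer_prefixes out) := by unfold Spec_resolve_layer_split_group_py; infer_instance

-- ===== CLAIM (what is proved, stated in full; the proofs are below) =====
def Claim_equal_resolve_layer_split_group_py : Prop := ∀ (tensor_name : String) (layer_prefixes : List String), Dom_resolve_layer_split_group_py tensor_name layer_prefixes → Spec_resolve_layer_split_group_py tensor_name layer_prefixes (resolve_layer_split_group_py tensor_name layer_prefixes)

-- ===== LEMMAS AND PROOFS =====

-- "prefix p scores a hit on t": nonempty, t starts with p+'.', and the remainder starts with digits+'.'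
def pvHitB (t p : List Char) : Bool :=
  !p.isEmpty && PySem.Chars.startswith t (p ++ ['.']) &&
    (PySem.Chars.strIsdigit (pvPartDot (t.drop (p ++ ['.']).length)).1 &&
      !(pvPartDot (t.drop (p ++ ['.']).length)).2.1.isEmpty)

def pvGroup (t p : List Char) : List Char :=
  p ++ '.' :: (pvPartDot (t.drop (p ++ ['.']).length)).1

-- two hits of equal length are the same prefix
theorem pvHit_uniq (t p q : List Char) (hp : pvHitB t p = true) (hq : pvHitB t q = true)
    (hl : p.length = q.length) : p = q := by
  simp only [pvHitB, Bool.and_eq_true, PySem.Chars.startswith_iff] at hp hq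
  have hp' : p <+: t := (List.prefix_append p ['.']).trans hp.1.2
  have hq' : q <+: t := (List.prefix_append q ['.']).trans hq.1.2
  rw [List.prefix_iff_eq_take] at hp' hq'
  rw [hp', hq', hl]

theorem pvAloop_char (t : List Char) (l : List (List Char)) (hne : ∀ p ∈ l, p ≠ []) :
    pvAloop t l = match l.find? (pvHitB t) with
      | some p => (String.ofList (pvGroup t p), true)
      | none => pvAloop t [] := by
  induction l with
  | nil => simp
  | cons p rest ih =>
    have hpne : p ≠ [] := hne p (by simp)
    have hrest := ih (fun q hq => hne q (by simp [hq]))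
    have hsplit : pvHitB t p = ((!p.isEmpty && PySem.Chars.startswith t (p ++ ['.'])) &&
        (PySem.Chars.strIsdigit (pvPartDot (t.drop (p.length + 1))).1 &&
          !(pvPartDot (t.drop (p.length + 1))).2.1.isEmpty)) := by
      simp [pvHitB]
    by_cases hs : PySem.Chars.startswith t (p ++ ['.']) = true
    · by_cases hd : (PySem.Chars.strIsdigit (pvPartDot (t.drop (p.length + 1))).1 &&
          !(pvPartDot (t.drop (p.length + 1))).2.1.isEmpty) = true
      · simp only [Bool.and_eq_true] at hd
        have hhit : pvHitB t p = true := by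
          rw [hsplit]; simp [hs, hpne, hd.1, hd.2]
        rw [List.find?_cons_of_pos hhit]
        simp [pvAloop, hs, hd.1, hd.2, pvGroup]
      · have hC := Bool.not_eq_true _ ▸ hd
        have hhit : ¬ pvHitB t p = true := by
          rw [hsplit, (Bool.not_eq_true _).mp hd, Bool.and_false]; simp
        rw [List.find?_cons_of_neg hhit]
        simp only [Bool.and_eq_true, not_and] at hd
        simp [pvAloop, hs, hrest]
        by_cases h1 : PySem.Chars.strIsdigit (pvPartDot (t.drop (p.length + 1))).1 = true
        · simp [h1, List.isEmpty_iff.mp (by simpa using hd h1)]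
        · simp [Bool.eq_false_iff.mpr h1]
    · have hhit : ¬ pvHitB t p = true := by
        rw [hsplit, Bool.eq_false_iff.mpr hs]; simp
      rw [List.find?_cons_of_neg hhit]
      simp [pvAloop, hs, hrest]

-- the first hit in a length-descending list has maximal length among all hits of the list
theorem pvFind_max (t : List Char) (l : List (List Char))
    (hsorted : l.Pairwise (fun a b => b.length ≤ a.length)) (p : List Char)
    (hf : l.find? (pvHitB t) = some p) :
    ∀ q ∈ l, pvHitB t q = true → q.length ≤ p.length := by
  induction l with
  | nil => simp at hf
  | cons a rest ih =>
    rcases List.pairwise_cons.mp hsorted with ⟨hle, hrest⟩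
    by_cases ha : pvHitB t a = true
    · rw [List.find?_cons_of_pos ha] at hf
      cases hf
      intro q hq _
      rcases List.mem_cons.mp hq with h | h
      · simp [h]
      · exact hle q h
    · rw [List.find?_cons_of_neg (by simp [ha])] at hf
      intro q hq hqh
      rcases List.mem_cons.mp hq with h | h
      · exact absurd (h ▸ hqh) ha
      · exact ih hrest hf q h hqh

-- invariant decoder for B's fold state
def pvInv (t : List Char) (st : Option (List Char) × Int) (b : Option (List Char)) : Prop :=
  match b with
  | none => st = (none, -1)
  | some p => pvHitB t p = true ∧ st = (some (pvGroup t p), (p.length : Int))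

theorem pvBstep_char (t : List Char) (st : Option (List Char) × Int) (b : Option (List Char))
    (hinv : pvInv t st b) (q : List Char) :
    ∃ b', pvInv t (pvBstep t st q) b' ∧
      (pvHitB t q = true → ∃ s, b' = some s ∧ q.length ≤ s.length) ∧
      (∀ p, b' = some p → b = some p ∨ p = q) ∧
      (b' = none → b = none) ∧
      (∀ p0, b = some p0 → ∃ s, b' = some s ∧ p0.length ≤ s.length) := by
  have hsplit : pvHitB t q = ((!q.isEmpty && PySem.Chars.startswith t (q ++ ['.'])) &&
      (PySem.Chars.strIsdigit (pvPartDot (t.drop (q.length + 1))).1 &&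
        !(pvPartDot (t.drop (q.length + 1))).2.1.isEmpty)) := by
    simp [pvHitB]
  by_cases hqe : q.isEmpty = true
  · have hhit : ¬ pvHitB t q = true := by rw [hsplit, hqe]; simp
    have hstep : pvBstep t st q = st := by simp [pvBstep, hqe]
    exact ⟨b, by rw [hstep]; exact hinv, fun h => absurd h hhit, fun p hp => Or.inl hp,
      fun h => h, fun p0 hb => ⟨p0, hb, le_refl _⟩⟩
  · replace hqe : q.isEmpty = false := Bool.eq_false_iff.mpr hqe
    by_cases hs : PySem.Chars.startswith t (q ++ ['.']) = true
    · by_cases hd : (PySem.Chars.strIsdigit (pvPartDot (t.drop (q.length + 1))).1 &&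
          !(pvPartDot (t.drop (q.length + 1))).2.1.isEmpty) = true
      · have hhit : pvHitB t q = true := by rw [hsplit]; simp [hqe, hs, hd]
        simp only [Bool.and_eq_true] at hd
        by_cases hgt : (q.length : Int) > st.2
        · have hstep : pvBstep t st q =
              (some (q ++ '.' :: (pvPartDot (t.drop (q.length + 1))).1), (q.length : Int)) := by
            simp [pvBstep, hqe, hs, hd.1, hd.2, hgt]
          refine ⟨some q, ?_, fun _ => ⟨q, rfl, le_refl _⟩, ?_, fun h => by simp at h, ?_⟩
          · refine ⟨hhit, ?_⟩
            rw [hstep]; simp [pvGroup]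
          · intro p hp
            injection hp with h
            exact Or.inr h.symm
          · intro p0 hb
            refine ⟨q, rfl, ?_⟩
            cases b with
            | none => simp at hb
            | some pp =>
              injection hb with h
              simp only [pvInv] at hinv
              have hst2 : st.2 = (pp.length : Int) := by rw [hinv.2]
              rw [h] at hst2
              omega
        · have hstep : pvBstep t st q = st := by
            simp [pvBstep, hqe, hs, hd.1, hd.2, hgt]
          refine ⟨b, by rw [hstep]; exact hinv, ?_, fun p hp => Or.inl hp, fun h => h,
            fun p0 hb => ⟨p0, hb, le_refl _⟩⟩
          intro _
          cases b with
          | none =>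
            simp only [pvInv] at hinv
            have hst2 : st.2 = -1 := by rw [hinv]
            omega
          | some pp =>
            simp only [pvInv] at hinv
            have hst2 : st.2 = (pp.length : Int) := by rw [hinv.2]
            exact ⟨pp, rfl, by omega⟩
      · have hhit : ¬ pvHitB t q = true := by
          rw [hsplit, (Bool.not_eq_true _).mp hd, Bool.and_false]; simp
        have hstep : pvBstep t st q = st := by
          by_cases h1 : PySem.Chars.strIsdigit (pvPartDot (t.drop (q.length + 1))).1 = true
          · have h2 : (pvPartDot (t.drop (q.length + 1))).2.1.isEmpty = true := by
              cases h2 : (pvPartDot (t.drop (q.length + 1))).2.1.isEmpty with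
              | true => rfl
              | false => exact absurd (by simp [h1, h2]) hd
            simp [pvBstep, hqe, hs, h1, h2]
          · simp [pvBstep, hqe, hs, Bool.eq_false_iff.mpr h1]
        exact ⟨b, by rw [hstep]; exact hinv, fun h => absurd h hhit, fun p hp => Or.inl hp,
          fun h => h, fun p0 hb => ⟨p0, hb, le_refl _⟩⟩
    · have hhit : ¬ pvHitB t q = true := by
        rw [hsplit, Bool.eq_false_iff.mpr hs]; simp
      have hstep : pvBstep t st q = st := by simp [pvBstep, hqe, hs]
      exact ⟨b, by rw [hstep]; exact hinv, fun h => absurd h hhit, fun p hp => Or.inl hp,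
        fun h => h, fun p0 hb => ⟨p0, hb, le_refl _⟩⟩

theorem pvFoldB_char (t : List Char) (l : List (List Char)) :
    ∀ (st : Option (List Char) × Int) (b : Option (List Char)), pvInv t st b →
    ∃ b', pvInv t (l.foldl (pvBstep t) st) b' ∧
      (∀ q ∈ l, pvHitB t q = true → ∃ s, b' = some s ∧ q.length ≤ s.length) ∧
      (∀ p, b' = some p → b = some p ∨ p ∈ l) ∧
      (b' = none → b = none) ∧
      (∀ p0, b = some p0 → ∃ s, b' = some s ∧ p0.length ≤ s.length) := by
  induction l with
  | nil =>
    intro st b hinv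
    exact ⟨b, hinv, by simp, fun p hp => Or.inl hp, fun h => h,
      fun p0 hb => ⟨p0, hb, le_refl _⟩⟩
  | cons q rest ih =>
    intro st b hinv
    obtain ⟨b1, hinv1, hhit1, hsrc1, hnone1, hmono1⟩ := pvBstep_char t st b hinv q
    obtain ⟨b', hinv', hhit', hsrc', hnone', hmono'⟩ := ih (pvBstep t st q) b1 hinv1
    refine ⟨b', by simpa using hinv', ?_, ?_, ?_, ?_⟩
    · intro r hr hrh
      rcases List.mem_cons.mp hr with h | h
      · subst h
        obtain ⟨s, hb1, hle⟩ := hhit1 hrh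
        obtain ⟨s', hb', hle'⟩ := hmono' s hb1
        exact ⟨s', hb', le_trans hle hle'⟩
      · exact hhit' r h hrh
    · intro p hp
      rcases hsrc' p hp with h | h
      · rcases hsrc1 p h with h' | h'
        · exact Or.inl h'
        · exact Or.inr (by simp [h'])
      · exact Or.inr (by simp [h])
    · intro h; exact hnone1 (hnone' h)
    · intro p0 hb
      obtain ⟨s, hb1, hle⟩ := hmono1 p0 hb
      obtain ⟨s', hb', hle'⟩ := hmono' s hb1
      exact ⟨s', hb', le_trans hle hle'⟩

-- ===== VERDICT (by name: the statement is the Claim_ definition above) =====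
theorem resolve_layer_split_group_py_spec : Claim_equal_resolve_layer_split_group_py := by
  intro tensor_name layer_prefixes _
  unfold Spec_resolve_layer_split_group_py
  unfold resolve_layer_split_group_py resolve_layer_split_group_py_alt
  set t := tensor_name.toList with ht
  set L := layer_prefixes.map String.toList with hL
  set F := L.filter (fun p => !p.isEmpty) with hF
  set S := PySem.List.sorted F (fun p => p.length) true with hS
  have hSne : ∀ p ∈ S, p ≠ [] := by
    intro p hp
    have : p ∈ F := (PySem.List.mem_sorted _ _ _ _).mp hp
    have := List.of_mem_filter this
    simpa using this
  have hSsorted : S.Pairwise (fun a b => b.length ≤ a.length) :=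
    PySem.List.sorted_pairwise_rev F (fun p => p.length)
  obtain ⟨b', hinv', hhit', hsrc', hnone', _⟩ :=
    pvFoldB_char t L (none, -1) none (by simp [pvInv])
  rw [pvAloop_char t S hSne]
  cases hfind : S.find? (pvHitB t) with
  | none =>
    have hb'none : b' = none := by
      cases hb : b' with
      | none => rfl
      | some p =>
        exfalso
        have hhitp : pvHitB t p = true := by
          cases hb ▸ hinv' with
          | _ => simp only [pvInv, hb] at hinv'; exact hinv'.1
        have hpL : p ∈ L := by
          rcases hsrc' p hb with h | h
          · simp at h
          · exact h
        have hpne : p ≠ [] := by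
          simp only [pvHitB, Bool.and_eq_true] at hhitp
          simpa using hhitp.1.1
        have hpS : p ∈ S := (PySem.List.mem_sorted _ _ _ _).mpr
          (List.mem_filter.mpr ⟨hpL, by simpa using hpne⟩)
        have := List.find?_eq_none.mp hfind p hpS
        exact this hhitp
    simp only [pvInv, hb'none] at hinv'
    rw [hinv']
    simp [pvAloop]
  | some p =>
    have hhitp : pvHitB t p = true := List.find?_some hfind
    have hpS : p ∈ S := List.mem_of_find?_eq_some hfind
    have hpL : p ∈ L := List.mem_of_mem_filter ((PySem.List.mem_sorted _ _ _ _).mp hpS)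
    obtain ⟨s, hbs, hles⟩ := hhit' p hpL hhitp
    simp only [pvInv, hbs] at hinv'
    obtain ⟨hhits, hst⟩ := hinv'
    have hsS : s ∈ S := by
      have hsne : s ≠ [] := by
        simp only [pvHitB, Bool.and_eq_true] at hhits
        simpa using hhits.1.1
      have hsL : s ∈ L := by
        rcases hsrc' s hbs with h | h
        · simp at h
        · exact h
      exact (PySem.List.mem_sorted _ _ _ _).mpr (List.mem_filter.mpr ⟨hsL, by simpa using hsne⟩)
    have hsle : s.length ≤ p.length := pvFind_max t S hSsorted p hfind s hsS hhits
    have heq : p = s := pvHit_uniq t p s hhitp hhits (le_antisymm hles hsle)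
    rw [hst]
    simp [pvGroup, heq]
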